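-- pv_equiv track=rewrite | github.com/intel/p3-analysis-library | p3analysis/plot/backend/__init__.py | _get_platform_labels
-- ===== SOURCE A (Python) =====
-- import itertools
-- import string
--
-- def _get_platform_labels(platforms: list[str]) -> dict[str, str]:
--     """
--     Returns
--     -------
--     dict[str, str]:
--         A mapping from platform names to unique labels.
--     """
--     if len(platforms) <= len(string.ascii_uppercase):
--         labels = string.ascii_uppercase
--     elif len(platforms) <= len(string.ascii_uppercase) ** 2:
--         labels = []
--         for x, y in itertools.product(string.ascii_uppercase, repeat=2):
--             labels.append(f"{x}{y}")
--     else: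
--         raise RuntimeError(
--             "The number of platforms supported by cascade plots is "
--             + f"currently limited to {len(string.ascii_uppercase)**2}.",
--         )
--     return dict(zip(platforms, labels))
-- ===== SOURCE B (Python) =====
-- def _get_platform_labels(platforms: list[str]) -> dict[str, str]:
--     """
--     Returns
--     -------
--     dict[str, str]:
--         A mapping from platform names to unique labels.
--     """
--     n = len(platforms)
--     if n > 26 ** 2:
--         raise RuntimeError(
--             "The number of platforms supported by cascade plots is "
--             + "currently limited to 676.",
--         )
--     width = 1 if n <= 26 else 2
--     result = {}
--     for i, p in enumerate(platforms):
--         if width == 1: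
--             result[p] = chr(ord("A") + i)
--         else:
--             result[p] = chr(ord("A") + i // 26) + chr(ord("A") + i % 26)
--     return result
-- ===== Notes on version B (the rewrite author's own statement) =====
-- stated objective: simpler
-- what changed: B computes each label arithmetically from its index (chr(ord('A')+...) with fixed width 1 or 2) in a single enumerate loop, instead of materializing the full 26 or 676-element label list via itertools.product and zipping.
import Mathlib
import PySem

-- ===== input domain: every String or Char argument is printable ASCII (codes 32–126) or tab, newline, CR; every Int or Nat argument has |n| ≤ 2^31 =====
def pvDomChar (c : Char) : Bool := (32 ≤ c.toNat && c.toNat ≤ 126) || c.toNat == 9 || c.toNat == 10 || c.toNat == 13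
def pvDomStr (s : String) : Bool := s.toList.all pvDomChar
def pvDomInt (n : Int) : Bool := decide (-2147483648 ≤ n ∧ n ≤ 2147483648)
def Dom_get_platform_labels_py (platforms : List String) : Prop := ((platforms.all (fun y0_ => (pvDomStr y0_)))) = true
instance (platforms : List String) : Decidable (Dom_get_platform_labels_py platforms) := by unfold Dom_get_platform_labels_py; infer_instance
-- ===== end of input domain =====

-- B builds each label arithmetically from its index in one pass instead of
-- materializing the full (26 or 676 element) label list and zipping: simpler.

-- ===== PORT A =====
-- string.ascii_uppercase
def pvUpper : List Char := "ABCDEFGHIJKLMNOPQRSTUVWXYZ".toList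

-- labels for the one-letter branch
def pvLabels1 : List String := pvUpper.map (fun c => String.ofList [c])

-- the loop 'for x, y in itertools.product(ascii_uppercase, repeat=2): labels.append(f"{x}{y}")'
def pvLabels2 : List String :=
  (pvUpper.flatMap (fun x => pvUpper.map (fun y => (x, y)))).foldl
    (fun ls (p : Char × Char) => ls ++ [String.ofList [p.1, p.2]]) []

def get_platform_labels_py (platforms : List String) : List (String × String) :=
  let labels : List String :=
    if platforms.length ≤ 26 then pvLabels1
    else pvLabels2   -- the else (> 26²) branch raises: excluded by Pre_
  ((platforms.zip labels).foldl
    (fun d (kv : String × String) => d.insert kv.1 kv.2)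
    (PySem.Dict.empty : PySem.Dict String String)).items

-- ===== PORT B =====
def pvLabelOf (width : Nat) (i : Nat) : String :=
  if width = 1 then String.ofList [Char.ofNat (65 + i)]
  else String.ofList [Char.ofNat (65 + i / 26), Char.ofNat (65 + i % 26)]

def get_platform_labels_py_alt (platforms : List String) : List (String × String) :=
  let n := platforms.length
  let width := if n ≤ 26 then 1 else 2
  (platforms.zipIdx.foldl
    (fun d (pi : String × Nat) => d.insert pi.1 (pvLabelOf width pi.2))
    (PySem.Dict.empty : PySem.Dict String String)).items

-- ===== PRECONDITION & SPEC =====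
-- A raises RuntimeError when more than 26² = 676 platforms are given (B raises the same error).
def Pre_get_platform_labels_py (platforms : List String) : Prop := platforms.length ≤ 676
instance (platforms : List String) : Decidable (Pre_get_platform_labels_py platforms) := by
  unfold Pre_get_platform_labels_py; infer_instance

def pvWitness_get_platform_labels_py : List String := ["cpu", "gpu", "fpga"]

def Spec_get_platform_labels_py (platforms : List String) (out : List (String × String)) : Prop := out = get_platform_labels_py_alt platforms
instance (platforms : List String) (out : List (String × String)) : Decidable (Spec_get_platform_labels_py platforms out) := by unfold Spec_get_platform_labels_py; infer_instance

-- ===== CLAIM (what is proved, stated in full; the proofs are below) =====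
def Claim_equal_get_platform_labels_py : Prop := ∀ (platforms : List String), Dom_get_platform_labels_py platforms → Pre_get_platform_labels_py platforms → Spec_get_platform_labels_py platforms (get_platform_labels_py platforms)

-- ===== LEMMAS AND PROOFS =====

-- zipping with a list whose i-th element is f (k+i) equals mapping f over zipIdx from k
theorem pv_zip_eq_zipIdx_map {α : Type} (ps : List α) :
    ∀ (ls : List String) (k : Nat) (f : Nat → String),
    (∀ i, i < ps.length → ls[i]? = some (f (k + i))) →
    ps.zip ls = (ps.zipIdx k).map (fun pi => (pi.1, f pi.2)) := by
  induction ps with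
  | nil => intro ls k f _; simp
  | cons p ps ih =>
    intro ls k f h
    cases ls with
    | nil => exact absurd (h 0 (by simp)) (by simp)
    | cons l ls' =>
      have h0 : f k = l := by
        have := h 0 (by simp); simpa using this.symm
      have htail : ∀ i, i < ps.length → ls'[i]? = some (f ((k + 1) + i)) := by
        intro i hi
        have := h (i + 1) (by simpa using Nat.succ_lt_succ hi)
        simpa [Nat.add_comm, Nat.add_left_comm, Nat.add_assoc] using this
      have hrec := ih ls' (k + 1) f htail
      rw [List.zip_cons_cons, List.zipIdx_cons, List.map_cons, hrec, h0]

theorem pvLabels1_get (i : Nat) (hi : i < 26) : pvLabels1[i]? = some (pvLabelOf 1 i) := by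
  revert i; decide

-- the loop 'labels.append(...)' over a list is the map of the appended element
theorem pv_foldl_append_eq_map {a b : Type} (g : a → b) :
    ∀ (l : List a) (acc : List b),
    l.foldl (fun ls p => ls ++ [g p]) acc = acc ++ l.map g := by
  intro l
  induction l with
  | nil => intro acc; simp
  | cons x xs ih => intro acc; simp [ih]

theorem pv_flatMap_pairs_get (as : List Char) :
    ∀ i, i < as.length * 26 →
    (as.flatMap (fun x => pvUpper.map (fun y => (x, y))))[i]? =
      some (as[i / 26]!, pvUpper[i % 26]!) := by
  induction as with
  | nil => intro i hi; simp at hi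
  | cons a as ih =>
    intro i hi
    have hlen : (pvUpper.map (fun y => (a, y))).length = 26 := by
      rw [List.length_map]; rfl
    rw [List.flatMap_cons]
    by_cases h26 : i < 26
    · rw [List.getElem?_append_left (by omega)]
      have hdiv : i / 26 = 0 := Nat.div_eq_of_lt h26
      have hmod : i % 26 = i := Nat.mod_eq_of_lt h26
      have hlt : i < pvUpper.length := by
        have : pvUpper.length = 26 := rfl
        omega
      rw [hdiv, hmod, List.getElem?_map, List.getElem?_eq_getElem hlt,
          List.getElem!_cons_zero]
      simp [List.getElem!_eq_getElem?_getD, List.getElem?_eq_getElem hlt]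
    · rw [List.getElem?_append_right (by omega)]
      rw [hlen]
      have hi' : i - 26 < as.length * 26 := by
        simp [List.length_cons] at hi; omega
      have := ih (i - 26) hi'
      rw [this]
      have hdiv : i / 26 = (i - 26) / 26 + 1 := by omega
      have hmod : i % 26 = (i - 26) % 26 := by omega
      rw [hdiv, hmod, List.getElem!_cons_succ]

theorem pvUpper_get (j : Nat) (hj : j < 26) : pvUpper[j]! = Char.ofNat (65 + j) := by
  revert j; decide

theorem pvLabels2_get (i : Nat) (hi : i < 676) : pvLabels2[i]? = some (pvLabelOf 2 i) := by
  have hmap := pv_foldl_append_eq_map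
    (fun p : Char × Char => String.ofList [p.1, p.2])
    (pvUpper.flatMap (fun x => pvUpper.map (fun y => (x, y)))) []
  have h2 : pvLabels2 =
      (pvUpper.flatMap (fun x => pvUpper.map (fun y => (x, y)))).map
        (fun p : Char × Char => String.ofList [p.1, p.2]) := by
    simpa [pvLabels2] using hmap
  have hpair := pv_flatMap_pairs_get pvUpper i (by simpa [pvUpper] using hi)
  rw [h2, List.getElem?_map, hpair]
  simp [pvLabelOf, pvUpper_get (i / 26) (by omega), pvUpper_get (i % 26) (by omega)]

-- ===== VERDICT (by name: the statement is the Claim_ definition above) =====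
theorem get_platform_labels_py_spec : Claim_equal_get_platform_labels_py := by
  intro platforms _ hpre
  unfold Spec_get_platform_labels_py get_platform_labels_py get_platform_labels_py_alt
  by_cases h26 : platforms.length ≤ 26
  · have hz : platforms.zip pvLabels1 =
        (platforms.zipIdx 0).map (fun pi => (pi.1, pvLabelOf 1 pi.2)) := by
      apply pv_zip_eq_zipIdx_map
      intro i hi
      simpa using pvLabels1_get i (lt_of_lt_of_le hi h26)
    simp only [h26, if_pos]
    rw [hz, List.foldl_map]
  · have h676 : platforms.length ≤ 676 := hpre
    have hz : platforms.zip pvLabels2 =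
        (platforms.zipIdx 0).map (fun pi => (pi.1, pvLabelOf 2 pi.2)) := by
      apply pv_zip_eq_zipIdx_map
      intro i hi
      simpa using pvLabels2_get i (lt_of_lt_of_le hi h676)
    simp only [h26, if_false]
    rw [hz, List.foldl_map]
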